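-- pv_equiv track=rewrite | github.com/unal-optodigital/FingermarkDeflectometry | functions.py | partition_in_boxes
-- ===== SOURCE A (Python) =====
-- def partition_in_boxes(h: int, w: int, cols_per_row=(5,5,5,5,5)):
--     """
--     Divide una imagen (h,w) en cajas según cols_per_row.
--     Para 3x3: cols_per_row=(3,3,3) -> 9 regiones.
--     Retorna lista de bounds (y0,y1,x0,x1) en orden row-major.
--     """
--     cols_per_row = list(cols_per_row)
--     if any(c < 1 for c in cols_per_row):
--         raise ValueError("cols_per_row inválido")
--     nrows = len(cols_per_row)
--
--     base_h, rem_h = divmod(h, nrows)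
--     row_heights = [base_h + (1 if i < rem_h else 0) for i in range(nrows)]
--
--     regions = []
--     y = 0
--     for r, ncols in enumerate(cols_per_row):
--         y0, y1 = y, y + row_heights[r]
--         y = y1
--
--         base_w, rem_w = divmod(w, ncols)
--         col_widths = [base_w + (1 if j < rem_w else 0) for j in range(ncols)]
--
--         x = 0
--         for cw in col_widths:
--             x0, x1 = x, x + cw
--             regions.append((y0, y1, x0, x1))
--             x = x1
--
--     return regions
-- ===== SOURCE B (Python) =====
-- def partition_in_boxes(h: int, w: int, cols_per_row=(5, 5, 5, 5, 5)):
--     """Same partition, but every boundary is computed by closed-form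
--     arithmetic: splitting `size` into n parts gives boundary before part k
--     at k*base + min(k, rem) with base, rem = divmod(size, n)."""
--     cols = list(cols_per_row)
--     if any(c < 1 for c in cols):
--         raise ValueError("cols_per_row inválido")
--     bh, rh = divmod(h, len(cols))
--     return [
--         (r * bh + min(r, rh), (r + 1) * bh + min(r + 1, rh),
--          j * bw + min(j, rw), (j + 1) * bw + min(j + 1, rw))
--         for r, nc in enumerate(cols)
--         for bw, rw in (divmod(w, nc),)
--         for j in range(nc)
--     ]
-- ===== Notes on version B (the rewrite author's own statement) =====
-- stated objective: alternative
-- what changed: Replaces the running y/x offset accumulators and the precomputed row_heights/col_widths lists with direct closed-form boundary arithmetic (boundary before part k of a size split into n parts is k*base+min(k,rem)), emitting all boxes in one comprehension.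
import Mathlib
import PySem

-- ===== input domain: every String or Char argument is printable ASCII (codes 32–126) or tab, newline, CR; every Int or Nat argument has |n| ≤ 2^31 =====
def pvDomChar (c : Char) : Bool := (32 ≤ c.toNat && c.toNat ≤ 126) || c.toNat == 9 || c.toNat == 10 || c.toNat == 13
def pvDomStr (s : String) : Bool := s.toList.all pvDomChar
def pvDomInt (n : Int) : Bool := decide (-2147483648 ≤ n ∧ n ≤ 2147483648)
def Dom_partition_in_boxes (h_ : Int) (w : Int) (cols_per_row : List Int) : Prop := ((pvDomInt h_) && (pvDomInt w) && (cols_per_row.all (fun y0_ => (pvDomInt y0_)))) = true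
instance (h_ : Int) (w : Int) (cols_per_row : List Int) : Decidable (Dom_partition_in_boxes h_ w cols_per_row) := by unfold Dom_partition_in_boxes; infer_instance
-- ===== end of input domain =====

-- B replaces A's running y/x offset accumulators and precomputed height/width lists
-- with closed-form boundary arithmetic (k*base + min k rem); objective: alternative.

-- ===== PORT A =====
def partition_in_boxes (h_ : Int) (w : Int) (cols_per_row : List Int) : List (Int × Int × Int × Int) :=
  if cols_per_row.any (fun c => decide (c < 1)) then []  -- raise ValueError (excluded by Pre_)
  else
    let nrows : Int := cols_per_row.length
    match PySem.Int.divmod? h_ nrows with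
    | none => []  -- ZeroDivisionError on empty cols_per_row (excluded by Pre_)
    | some bh =>
      let row_heights : List Int :=
        (PySem.List.pyRange 0 nrows 1).map (fun i => bh.1 + if i < bh.2 then 1 else 0)
      let st := (PySem.List.enumerate cols_per_row 0).foldl
        (fun (st : List (Int × Int × Int × Int) × Int) rn =>
          let y0 := st.2
          let y1 := st.2 + PySem.List.pyGetD row_heights rn.1 0
          match PySem.Int.divmod? w rn.2 with
          | none => st  -- unreachable under Pre_ (every ncols ≥ 1)
          | some bw =>
            let col_widths : List Int :=
              (PySem.List.pyRange 0 rn.2 1).map (fun j => bw.1 + if j < bw.2 then 1 else 0)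
            let inner := col_widths.foldl
              (fun (st2 : List (Int × Int × Int × Int) × Int) cw =>
                (st2.1 ++ [(y0, y1, st2.2, st2.2 + cw)], st2.2 + cw))
              (st.1, 0)
            (inner.1, y1))
        ([], 0)
      st.1

-- ===== PORT B =====
def partition_in_boxes_alt (h_ : Int) (w : Int) (cols_per_row : List Int) : List (Int × Int × Int × Int) :=
  if cols_per_row.any (fun c => decide (c < 1)) then []  -- raise ValueError (excluded by Pre_)
  else
    match PySem.Int.divmod? h_ cols_per_row.length with
    | none => []  -- ZeroDivisionError on empty cols_per_row (excluded by Pre_)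
    | some bh =>
      (PySem.List.enumerate cols_per_row 0).flatMap (fun rn =>
        match PySem.Int.divmod? w rn.2 with
        | none => []  -- unreachable under Pre_
        | some bw =>
          (PySem.List.pyRange 0 rn.2 1).map (fun j =>
            (rn.1 * bh.1 + min rn.1 bh.2, (rn.1 + 1) * bh.1 + min (rn.1 + 1) bh.2,
             j * bw.1 + min j bw.2, (j + 1) * bw.1 + min (j + 1) bw.2)))

-- ===== PRECONDITION & SPEC =====
-- Pre_ excludes exactly the inputs where A raises: empty cols_per_row (ZeroDivisionError)
-- and any entry < 1 (ValueError).
def Pre_partition_in_boxes (h_ : Int) (w : Int) (cols_per_row : List Int) : Prop :=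
  cols_per_row ≠ [] ∧ ∀ c ∈ cols_per_row, 1 ≤ c
instance (h_ : Int) (w : Int) (cols_per_row : List Int) : Decidable (Pre_partition_in_boxes h_ w cols_per_row) := by
  unfold Pre_partition_in_boxes; infer_instance
def pvWitness_partition_in_boxes : Int × Int × List Int := (7, 10, [3, 2, 3])

def Spec_partition_in_boxes (h_ : Int) (w : Int) (cols_per_row : List Int) (out : List (Int × Int × Int × Int)) : Prop := out = partition_in_boxes_alt h_ w cols_per_row
instance (h_ : Int) (w : Int) (cols_per_row : List Int) (out : List (Int × Int × Int × Int)) : Decidable (Spec_partition_in_boxes h_ w cols_per_row out) := by unfold Spec_partition_in_boxes; infer_instance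

-- ===== CLAIM (what is proved, stated in full; the proofs are below) =====
def Claim_equal_partition_in_boxes : Prop := ∀ (h_ : Int) (w : Int) (cols_per_row : List Int), Dom_partition_in_boxes h_ w cols_per_row → Pre_partition_in_boxes h_ w cols_per_row → Spec_partition_in_boxes h_ w cols_per_row (partition_in_boxes h_ w cols_per_row)

-- ===== LEMMAS AND PROOFS =====

-- Inner loop of A: folding the first n column widths equals the closed-form boxes,
-- and the running x equals n*bw + min n rw.
lemma inner_loop (bw rw y0 y1 : Int) (hrw : 0 ≤ rw) :
    ∀ (n : Nat) (acc : List (Int × Int × Int × Int)),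
    ((PySem.List.pyRange 0 (n : Int) 1).map (fun j => bw + if j < rw then 1 else 0)).foldl
      (fun (st2 : List (Int × Int × Int × Int) × Int) cw =>
        (st2.1 ++ [(y0, y1, st2.2, st2.2 + cw)], st2.2 + cw)) (acc, 0)
    = (acc ++ (PySem.List.pyRange 0 (n : Int) 1).map (fun j =>
        (y0, y1, j * bw + min j rw, (j + 1) * bw + min (j + 1) rw)),
       (n : Int) * bw + min (n : Int) rw) := by
  intro n
  induction n with
  | zero =>
    intro acc
    simp [PySem.List.pyRange_one_eq_nil (by omega : (0:Int) ≤ 0)]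
    omega
  | succ n ih =>
    intro acc
    have hsplit : PySem.List.pyRange 0 ((n + 1 : Nat) : Int) 1
        = PySem.List.pyRange 0 (n : Int) 1 ++ [(n : Int)] := by
      have := PySem.List.pyRange_one_succ_right (a := 0) (b := (n : Int)) (by omega)
      push_cast
      push_cast at this
      exact this
    have e1 : (n : Int) * bw + min (n : Int) rw + (bw + if (n : Int) < rw then 1 else 0)
        = ((n : Int) + 1) * bw + min ((n : Int) + 1) rw := by
      rcases (by omega : rw ≤ (n : Int) ∨ (n : Int) < rw) with h | h
      · rw [min_eq_right h, min_eq_right (by omega), if_neg (by omega)]; ring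
      · rw [min_eq_left h.le, min_eq_left (by omega), if_pos h]; ring
    rw [hsplit, List.map_append, List.foldl_append, ih acc, List.map_append]
    simp only [List.map_cons, List.map_nil, List.foldl_cons, List.foldl_nil]
    push_cast
    rw [e1, ← List.append_assoc]

-- Row loop of A starting at index s with y = s*bh + min s rh.
lemma row_loop (w : Int) (bh rh : Int) (nrows : Int)
    (row_heights : List Int)
    (hrows : row_heights = (PySem.List.pyRange 0 nrows 1).map (fun i => bh + if i < rh then 1 else 0)) :
    ∀ (t : List Int) (s : Int) (acc : List (Int × Int × Int × Int)),
    0 ≤ s → s + t.length ≤ nrows → (∀ c ∈ t, 1 ≤ c) →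
    (PySem.List.enumerate t s).foldl
      (fun (st : List (Int × Int × Int × Int) × Int) rn =>
        match PySem.Int.divmod? w rn.2 with
        | none => st
        | some bw =>
          ((((PySem.List.pyRange 0 rn.2 1).map (fun j => bw.1 + if j < bw.2 then 1 else 0)).foldl
              (fun (st2 : List (Int × Int × Int × Int) × Int) cw =>
                (st2.1 ++ [(st.2, st.2 + PySem.List.pyGetD row_heights rn.1 0, st2.2, st2.2 + cw)],
                 st2.2 + cw))
              (st.1, 0)).1,
           st.2 + PySem.List.pyGetD row_heights rn.1 0))
      (acc, s * bh + min s rh)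
    = (acc ++ (PySem.List.enumerate t s).flatMap (fun rn =>
        match PySem.Int.divmod? w rn.2 with
        | none => []
        | some bw =>
          (PySem.List.pyRange 0 rn.2 1).map (fun j =>
            (rn.1 * bh + min rn.1 rh, (rn.1 + 1) * bh + min (rn.1 + 1) rh,
             j * bw.1 + min j bw.2, (j + 1) * bw.1 + min (j + 1) bw.2))),
       (s + t.length) * bh + min (s + t.length) rh) := by
  intro t
  induction t with
  | nil =>
    intro s acc _ _ _
    simp [PySem.List.enumerate]
  | cons c t ih =>
    intro s acc hs hb hall
    have hc : 1 ≤ c := hall c (by simp)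
    have hc0 : c ≠ 0 := by omega
    have hcm : ((c.toNat : Nat) : Int) = c := Int.toNat_of_nonneg (by omega)
    have hget : PySem.List.pyGetD row_heights s 0 = bh + if s < rh then 1 else 0 := by
      rw [hrows]
      exact PySem.List.pyGetD_map_pyRange_of_nonneg _ _ _ _ hs (by simp at hb; omega)
    have e2 : s * bh + min s rh + (bh + if s < rh then 1 else 0)
        = (s + 1) * bh + min (s + 1) rh := by
      rcases (by omega : rh ≤ s ∨ s < rh) with h | h
      · rw [min_eq_right h, min_eq_right (by omega), if_neg (by omega)]; ring
      · rw [min_eq_left h.le, min_eq_left (by omega), if_pos h]; ring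
    rw [PySem.List.enumerate_cons, List.foldl_cons, List.flatMap_cons]
    simp only [PySem.Int.divmod?] at ih ⊢
    rw [if_neg hc0]
    simp only [hget, e2]
    rw [show (PySem.List.pyRange 0 c 1) = (PySem.List.pyRange 0 ((c.toNat : Nat) : Int) 1) by rw [hcm]]
    rw [inner_loop (Int.fdiv w c) (Int.fmod w c) _ _
          (PySem.Int.mod_nonneg w (by omega : (0:Int) < c)) c.toNat acc]
    simp only [hcm]
    rw [ih (s + 1) _ (by omega) (by simp at hb ⊢; omega) (fun x hx => hall x (by simp [hx]))]
    rw [List.append_assoc]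
    simp only [Prod.mk.injEq, List.length_cons]
    refine ⟨trivial, ?_⟩
    push_cast
    have hl : s + 1 + (t.length : Int) = s + ((t.length : Int) + 1) := by ring
    rw [hl]

-- ===== VERDICT (by name: the statement is the Claim_ definition above) =====
theorem partition_in_boxes_spec : Claim_equal_partition_in_boxes := by
  intro h_ w cols _ hpre
  obtain ⟨hne, hall⟩ := hpre
  unfold Spec_partition_in_boxes partition_in_boxes partition_in_boxes_alt
  have hguard : cols.any (fun c => decide (c < 1)) = false := by
    refine List.any_eq_false.mpr ?_
    intro x hx
    have := hall x hx
    simp only [decide_eq_true_eq]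
    omega
  have hlen : cols.length ≠ 0 := by
    intro h
    exact hne (List.length_eq_zero_iff.1 h)
  have hdm : PySem.Int.divmod? h_ (cols.length : Int)
      = some (Int.fdiv h_ (cols.length : Int), Int.fmod h_ (cols.length : Int)) := by
    simp [PySem.Int.divmod?, hne]
  simp only [hguard, Bool.false_eq_true, if_false, hdm]
  have hrh : (0:Int) ≤ Int.fmod h_ (cols.length : Int) :=
    PySem.Int.mod_nonneg h_ (by omega : (0:Int) < (cols.length : Int))
  have hinit : ((([] : List (Int × Int × Int × Int)), (0:Int)))
      = (([] : List (Int × Int × Int × Int)), 0 * Int.fdiv h_ (cols.length : Int)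
          + min 0 (Int.fmod h_ (cols.length : Int))) := by
    rw [min_eq_left hrh]; norm_num
  rw [hinit, row_loop w (Int.fdiv h_ (cols.length : Int)) (Int.fmod h_ (cols.length : Int))
        (cols.length : Int) _ rfl cols 0 [] le_rfl (by omega) hall]
  simp
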